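-- pv_equiv track=rewrite | github.com/ghend1729/CFEdges | Hamiltonian.py | partitionNorm2
-- ===== SOURCE A (Python) =====
-- import math
--
-- def partitionNorm2(p):
--     a = 1
--     for i in p:
--         a = a*i
--     b = 1
--     for i in set(p):
--         b = b*math.factorial(p.count(i))
--     return a*b
-- ===== SOURCE B (Python) =====
-- def partitionNorm2(p):
--     result = 1
--     seen = {}
--     for i in p:
--         c = seen.get(i, 0) + 1
--         seen[i] = c
--         result *= i * c
--     return result
-- ===== Notes on version B (the rewrite author's own statement) =====
-- stated objective: faster
-- what changed: Two-phase product-then-factorials-of-counts is replaced by a single pass with one accumulator: each element i contributes i times its running occurrence count, so the factorials arise implicitly and math.factorial, set() and the repeated p.count scans disappear.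
import Mathlib
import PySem

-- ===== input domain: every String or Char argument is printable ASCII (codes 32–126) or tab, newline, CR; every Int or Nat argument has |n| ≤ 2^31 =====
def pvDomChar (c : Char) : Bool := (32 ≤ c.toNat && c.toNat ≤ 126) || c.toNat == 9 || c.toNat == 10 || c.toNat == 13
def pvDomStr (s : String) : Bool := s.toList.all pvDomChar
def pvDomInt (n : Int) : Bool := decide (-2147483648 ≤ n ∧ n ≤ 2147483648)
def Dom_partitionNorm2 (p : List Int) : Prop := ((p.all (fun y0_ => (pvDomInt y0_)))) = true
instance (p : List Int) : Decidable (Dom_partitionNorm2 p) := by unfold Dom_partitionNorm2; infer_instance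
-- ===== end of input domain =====

-- B fuses A's two phases (product of elements; product over set(p) of factorial(p.count(i)))
-- into ONE pass with a single accumulator: each element contributes i times its running
-- occurrence count, so the factorials arise implicitly (objective: faster, no rescans).

-- ===== PORT A =====
-- a = product of p in order; b = product over set(p) of factorial(p.count(i)); return a*b.
def partitionNorm2 (p : List Int) : Int :=
  let a := p.foldl (fun a i => a * i) 1
  let b := (PySem.Set.ofList p).foldl
      (fun b i => b * ((Nat.factorial (PySem.List.count p i)) : Int)) 1
  a * b

-- ===== PORT B =====
-- single pass: result *= i * c where c = seen.get(i,0)+1 is i's running occurrence count.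
def partitionNorm2_alt (p : List Int) : Int :=
  (p.foldl
    (fun (st : Int × PySem.Dict Int Int) i =>
      let c := PySem.Dict.getD st.2 i 0 + 1
      (st.1 * (i * c), PySem.Dict.insert st.2 i c))
    (1, PySem.Dict.empty)).1

-- ===== PRECONDITION & SPEC =====
def Spec_partitionNorm2 (p : List Int) (out : Int) : Prop := out = partitionNorm2_alt p
instance (p : List Int) (out : Int) : Decidable (Spec_partitionNorm2 p out) := by unfold Spec_partitionNorm2; infer_instance

-- ===== CLAIM (what is proved, stated in full; the proofs are below) =====
def Claim_equal_partitionNorm2 : Prop := ∀ (p : List Int), Dom_partitionNorm2 p → Spec_partitionNorm2 p (partitionNorm2 p)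

-- ===== LEMMAS AND PROOFS =====

-- B's dict component after processing p is Counter(p) (the result component is ignored by it)
lemma alt_snd_eq_counter (p : List Int) (r : Int) (d : PySem.Dict Int Int) :
    (p.foldl
      (fun (st : Int × PySem.Dict Int Int) i =>
        let c := PySem.Dict.getD st.2 i 0 + 1
        (st.1 * (i * c), PySem.Dict.insert st.2 i c))
      (r, d)).2
    = p.foldl (fun d i => PySem.Dict.insert d i (PySem.Dict.getD d i 0 + 1)) d := by
  induction p generalizing r d with
  | nil => rfl
  | cons x xs ih => simp [List.foldl, ih]

-- B satisfies the recurrence B (p ++ [x]) = B p * (x * (count p x + 1))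
lemma alt_append (p : List Int) (x : Int) :
    partitionNorm2_alt (p ++ [x])
      = partitionNorm2_alt p * (x * ((p.count x : Int) + 1)) := by
  unfold partitionNorm2_alt
  rw [List.foldl_append]
  have h2 := alt_snd_eq_counter p 1 PySem.Dict.empty
  simp only [List.foldl]
  rw [h2, PySem.Dict.foldl_insert_getD_add_one_eq_counter, PySem.Dict.getD_counter]

-- A's b-part as a prod over the map of factorials of counts
lemma A_b_eq_prod (p q : List Int) :
    (PySem.Set.ofList p).foldl
        (fun b i => b * ((Nat.factorial (PySem.List.count q i)) : Int)) 1
      = ((PySem.Set.ofList p).map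
          (fun i => ((Nat.factorial (PySem.List.count q i)) : Int))).prod := by
  rw [List.prod_eq_foldl, List.foldl_map]

-- set(p ++ [x]) in terms of set(p)
lemma ofList_append_singleton (p : List Int) (x : Int) :
    PySem.Set.ofList (p ++ [x])
      = if x ∈ p then PySem.Set.ofList p else PySem.Set.ofList p ++ [x] := by
  have h : PySem.Set.ofList (p ++ [x]) = PySem.Set.add (PySem.Set.ofList p) x := by
    simp [PySem.Set.ofList, List.foldl_append]
  rw [h]
  by_cases hx : x ∈ p <;>
    simp [PySem.Set.add, PySem.Set.contains, PySem.Set.mem_ofList, hx]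

-- A satisfies the same recurrence
lemma A_append (p : List Int) (x : Int) :
    partitionNorm2 (p ++ [x])
      = partitionNorm2 p * (x * ((p.count x : Int) + 1)) := by
  unfold partitionNorm2
  rw [List.foldl_append, A_b_eq_prod, A_b_eq_prod, ofList_append_singleton]
  simp only [List.foldl]
  by_cases hx : x ∈ p
  · rw [if_pos hx]
    have hnd : (PySem.Set.ofList p).Nodup := PySem.Set.nodup_ofList p
    have hmem : x ∈ PySem.Set.ofList p := by simp [PySem.Set.mem_ofList, hx]
    have hperm : List.Perm (PySem.Set.ofList p) (x :: (PySem.Set.ofList p).erase x) :=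
      List.perm_cons_erase hmem
    have hprod : ∀ (f : Int → Int),
        ((PySem.Set.ofList p).map f).prod
          = f x * (((PySem.Set.ofList p).erase x).map f).prod := by
      intro f
      rw [(hperm.map f).prod_eq, List.map_cons, List.prod_cons]
    rw [hprod, hprod]
    have hcongr : ((PySem.Set.ofList p).erase x).map
          (fun i => ((Nat.factorial (PySem.List.count (p ++ [x]) i)) : Int))
        = ((PySem.Set.ofList p).erase x).map
          (fun i => ((Nat.factorial (PySem.List.count p i)) : Int)) := by
      apply List.map_congr_left
      intro i hi
      have hne : i ≠ x := by
        intro h; subst h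
        exact (List.Nodup.not_mem_erase hnd) hi
      simp [PySem.List.count, List.count_append, Ne.symm hne]
    rw [hcongr]
    have hfx : ((Nat.factorial (PySem.List.count (p ++ [x]) x)) : Int)
        = ((Nat.factorial (PySem.List.count p x)) : Int) * ((p.count x : Int) + 1) := by
      have hcnt : PySem.List.count (p ++ [x]) x = p.count x + 1 := by
        simp [PySem.List.count, List.count_append]
      rw [hcnt, Nat.factorial_succ]
      push_cast
      simp [PySem.List.count]
      ring
    rw [hfx]
    ring
  · rw [if_neg hx]
    simp only [List.map_append, List.prod_append, List.map_cons, List.map_nil,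
      List.prod_cons, List.prod_nil]
    have hcongr : (PySem.Set.ofList p).map
          (fun i => ((Nat.factorial (PySem.List.count (p ++ [x]) i)) : Int))
        = (PySem.Set.ofList p).map
          (fun i => ((Nat.factorial (PySem.List.count p i)) : Int)) := by
      apply List.map_congr_left
      intro i hi
      have hne : i ≠ x := fun h => hx (h ▸ (PySem.Set.mem_ofList p i).mp hi)
      simp [PySem.List.count, List.count_append, Ne.symm hne]
    have hc0 : p.count x = 0 := List.count_eq_zero.mpr hx
    have hfx : ((Nat.factorial (PySem.List.count (p ++ [x]) x)) : Int) = 1 := by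
      simp [PySem.List.count, List.count_append, hc0]
    rw [hcongr, hfx, hc0]
    ring

lemma main_eq (p : List Int) : partitionNorm2 p = partitionNorm2_alt p := by
  induction p using List.reverseRecOn with
  | nil => rfl
  | append_singleton xs x ih => rw [A_append, alt_append, ih]

-- ===== VERDICT (by name: the statement is the Claim_ definition above) =====
theorem partitionNorm2_spec : Claim_equal_partitionNorm2 := by
  intro p _
  exact main_eq p
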